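-- pv_equiv track=rewrite | github.com/hkk828/ProblemSolving | samsung/BeadEscape2/bead_escape2.py | tilt_row_right
-- ===== SOURCE A (Python) =====
-- def tilt_row_right(row):
--     tilted_row = row[:]
--
--     # 빨간구슬과 파란구슬의 index를 저장한다 (없으면 -1)
--     red = tilted_row.index('R') if 'R' in tilted_row else -1
--     blue = tilted_row.index('B') if 'B' in tilted_row else -1
--
--     # front에는 더 오른쪽에 있는 구슬의 index, back에는 나머지 구슬의 index를 저장한다
--     front = blue if red < blue else red
--     back = red if red < blue else blue
--
--     # 최대 (행의 길이-3) 번까지 구슬들을 오른쪽으로 움직여준다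
--     for _ in range(len(row)-3):
--         # 앞에 있는 구슬이 오른쪽으로 움직일 수 있는 가능성이 있는 경우만
--         if front in range(1, len(row)-2):
--             # 앞구슬 오른쪽에 구멍이 있으면 앞구슬을 뺀다
--             if tilted_row[front+1] == 'O':
--                 tilted_row[front] = '.'
--                 front = -1
--             # 앞구슬 오른쪽이 비어있으면 앞구슬을 오른쪽으로 한칸 전진시킨다
--             elif tilted_row[front+1] == '.':
--                 tilted_row[front+1], tilted_row[front] = tilted_row[front], tilted_row[front+1]
--                 front += 1
--
--         # 뒤에 있는 구슬이 오른쪽으로 움직일 수 있는 가능성이 있는 경우만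
--         if back in range(1, len(row)-2):
--             # 뒷구슬 오른쪽에 구멍이 있으면 뒷구슬을 뺀다
--             if tilted_row[back+1] == 'O':
--                 tilted_row[back] = '.'
--                 back = -1
--             # 뒷구슬 오른쪽이 비어있으면 뒷구슬을 오른쪽으로 한칸 전진시킨다
--             elif tilted_row[back+1] == '.':
--                 tilted_row[back+1], tilted_row[back] = tilted_row[back], tilted_row[back+1]
--                 back += 1
--
--     return tilted_row
-- ===== SOURCE B (Python) =====
-- def tilt_row_right(row):
--     # Slide each bead rightward to completion, rightmost bead first.
--     tilted = row[:]
--     n = len(tilted)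
--
--     def slide(i):
--         while 1 <= i < n - 2:
--             nxt = tilted[i + 1]
--             if nxt == 'O':
--                 tilted[i] = '.'
--                 return
--             if nxt != '.':
--                 return
--             tilted[i + 1] = tilted[i]
--             tilted[i] = '.'
--             i += 1
--
--     red = tilted.index('R') if 'R' in tilted else -1
--     blue = tilted.index('B') if 'B' in tilted else -1
--     first, second = (blue, red) if red < blue else (red, blue)
--     slide(first)
--     slide(second)
--     return tilted
-- ===== Notes on version B (the rewrite author's own statement) =====
-- stated objective: simpler
-- what changed: A advances both beads together in lockstep for a fixed len(row)-3 synchronized rounds, tracking two cursors per round; B slides one bead at a time to completion with a small helper (rightmost bead first, then the other) and stops as soon as each bead settles.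
import Mathlib
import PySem

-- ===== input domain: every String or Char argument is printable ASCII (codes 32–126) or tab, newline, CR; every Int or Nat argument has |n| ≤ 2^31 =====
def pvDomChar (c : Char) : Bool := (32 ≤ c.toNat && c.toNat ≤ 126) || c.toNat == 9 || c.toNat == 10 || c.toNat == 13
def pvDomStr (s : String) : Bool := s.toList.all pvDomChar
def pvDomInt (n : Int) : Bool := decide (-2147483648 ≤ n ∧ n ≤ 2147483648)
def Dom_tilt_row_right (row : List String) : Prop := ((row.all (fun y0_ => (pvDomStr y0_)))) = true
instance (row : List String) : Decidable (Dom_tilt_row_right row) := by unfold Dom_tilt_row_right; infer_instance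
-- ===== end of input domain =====

-- B slides each bead rightward to completion (rightmost first) instead of A's synchronized
-- per-step simulation; same return value, no mutation of the argument in either Lean port.

-- ===== PORT A =====
-- one 'if front/back in range(1, len-2): …' block of A's loop body (the body duplicates it
-- verbatim for front and back, so it is a shared helper here)
def moveA (n : Int) (t : List String) (i : Int) : List String × Int :=
  if 1 ≤ i ∧ i < n - 2 then
    if PySem.List.pyGetD t (i + 1) "" = "O" then
      (t.set i.toNat ".", -1)
    else if PySem.List.pyGetD t (i + 1) "" = "." then
      ((t.set (i + 1).toNat (PySem.List.pyGetD t i "")).set i.toNat (PySem.List.pyGetD t (i + 1) ""), i + 1)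
    else (t, i)
  else (t, i)

-- 'for _ in range(len(row)-3): <front block>; <back block>'
def loopA (n : Int) : Nat → List String → Int → Int → List String × Int × Int
  | 0, t, f, b => (t, f, b)
  | k + 1, t, f, b =>
    let pf := moveA n t f
    let pb := moveA n pf.1 b
    loopA n k pb.1 pf.2 pb.2

def tilt_row_right (row : List String) : List String :=
  let red : Int := match PySem.List.index? row "R" with | some k => (k : Int) | none => -1
  let blue : Int := match PySem.List.index? row "B" with | some k => (k : Int) | none => -1
  let front : Int := if red < blue then blue else red
  let back : Int := if red < blue then red else blue
  (loopA (row.length : Int) (row.length - 3) row front back).1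

-- ===== PORT B =====
-- 'def slide(i): while 1 <= i < n - 2: …' — slides one bead rightward to completion
def slideB (n : Int) (t : List String) (i : Int) : List String :=
  if h : 1 ≤ i ∧ i < n - 2 then
    if PySem.List.pyGetD t (i + 1) "" = "O" then t.set i.toNat "."
    else if PySem.List.pyGetD t (i + 1) "" = "." then
      slideB n ((t.set (i + 1).toNat (PySem.List.pyGetD t i "")).set i.toNat ".") (i + 1)
    else t
  else t
termination_by (n - 2 - i).toNat
decreasing_by omega

def tilt_row_right_alt (row : List String) : List String :=
  let n : Int := (row.length : Int)
  let red : Int := match PySem.List.index? row "R" with | some k => (k : Int) | none => -1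
  let blue : Int := match PySem.List.index? row "B" with | some k => (k : Int) | none => -1
  let fs : Int × Int := if red < blue then (blue, red) else (red, blue)
  slideB n (slideB n row fs.1) fs.2

-- ===== PRECONDITION & SPEC =====
def Spec_tilt_row_right (row : List String) (out : List String) : Prop := out = tilt_row_right_alt row
instance (row : List String) (out : List String) : Decidable (Spec_tilt_row_right row out) := by unfold Spec_tilt_row_right; infer_instance

-- ===== CLAIM (what is proved, stated in full; the proofs are below) =====
def Claim_equal_tilt_row_right : Prop := ∀ (row : List String), Dom_tilt_row_right row → Spec_tilt_row_right row (tilt_row_right row)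

-- ===== LEMMAS AND PROOFS =====

-- basic cell/set facts
lemma pyGetD_set_ne (t : List String) (j : Nat) (v : String) (i : Int)
    (h0 : 0 ≤ i) (h : i ≠ (j : Int)) :
    PySem.List.pyGetD (t.set j v) i "" = PySem.List.pyGetD t i "" := by
  rw [PySem.List.pyGetD_of_nonneg _ _ h0, PySem.List.pyGetD_of_nonneg _ _ h0]
  simp [List.getD_eq_getElem?_getD, List.getElem?_set_ne (show j ≠ i.toNat by omega)]

lemma pyGetD_set_eq (t : List String) (j : Nat) (v : String) (i : Int)
    (h0 : 0 ≤ i) (hij : i = (j : Int)) (hj : j < t.length) :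
    PySem.List.pyGetD (t.set j v) i "" = v := by
  subst hij
  rw [PySem.List.pyGetD_of_nonneg _ _ h0]
  simp [List.getD_eq_getElem?_getD, hj]

-- one-step unfolding of slideB with a plain ite
lemma slideB_eq (n : Int) (t : List String) (i : Int) :
    slideB n t i =
      if 1 ≤ i ∧ i < n - 2 then
        if PySem.List.pyGetD t (i + 1) "" = "O" then t.set i.toNat "."
        else if PySem.List.pyGetD t (i + 1) "" = "." then
          slideB n ((t.set (i + 1).toNat (PySem.List.pyGetD t i "")).set i.toNat ".") (i + 1)
        else t
      else t := by
  rw [slideB]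
  simp only [dite_eq_ite]

lemma slideB_id (n : Int) (t : List String) (i : Int) (h : ¬(1 ≤ i ∧ i < n - 2)) :
    slideB n t i = t := by
  rw [slideB_eq, if_neg h]

-- slideB commutes with writing a cell strictly below its start index
lemma slideB_set_lt (n : Int) (v : String) :
    ∀ (m : Nat) (t : List String) (i : Int) (j : Nat),
      (n - 2 - i).toNat = m → (j : Int) < i →
      slideB n (t.set j v) i = (slideB n t i).set j v := by
  intro m
  induction m using Nat.strong_induction_on with
  | _ m IH =>
    intro t i j hm hj
    rw [slideB_eq n (t.set j v) i, slideB_eq n t i]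
    by_cases hc : 1 ≤ i ∧ i < n - 2
    · rw [if_pos hc, if_pos hc,
        pyGetD_set_ne t j v (i + 1) (by omega) (by omega)]
      by_cases hO : PySem.List.pyGetD t (i + 1) "" = "O"
      · rw [if_pos hO, if_pos hO, List.set_comm _ _ (show j ≠ i.toNat by omega)]
      · rw [if_neg hO, if_neg hO]
        by_cases hD : PySem.List.pyGetD t (i + 1) "" = "."
        · rw [if_pos hD, if_pos hD,
            pyGetD_set_ne t j v i (by omega) (by omega),
            List.set_comm v _ (show j ≠ (i + 1).toNat by omega),
            List.set_comm v _ (show j ≠ i.toNat by omega)]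
          exact IH ((n - 2 - (i + 1)).toNat) (by omega) _ (i + 1) j rfl (by omega)
        · rw [if_neg hD, if_neg hD]
    · rw [if_neg hc, if_neg hc]

lemma slideB_set_lt' (n : Int) (t : List String) (i : Int) (j : Nat) (v : String)
    (hj : (j : Int) < i) :
    slideB n (t.set j v) i = (slideB n t i).set j v :=
  slideB_set_lt n v _ t i j rfl hj

-- slideB leaves the cells strictly below its start index unchanged
lemma slideB_pyGetD_lt (n : Int) :
    ∀ (m : Nat) (t : List String) (i j : Int),
      (n - 2 - i).toNat = m → 0 ≤ j → j < i →
      PySem.List.pyGetD (slideB n t i) j "" = PySem.List.pyGetD t j "" := by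
  intro m
  induction m using Nat.strong_induction_on with
  | _ m IH =>
    intro t i j hm h0 hj
    rw [slideB_eq n t i]
    by_cases hc : 1 ≤ i ∧ i < n - 2
    · rw [if_pos hc]
      by_cases hO : PySem.List.pyGetD t (i + 1) "" = "O"
      · rw [if_pos hO, pyGetD_set_ne t i.toNat "." j h0 (by omega)]
      · rw [if_neg hO]
        by_cases hD : PySem.List.pyGetD t (i + 1) "" = "."
        · rw [if_pos hD,
            IH ((n - 2 - (i + 1)).toNat) (by omega) _ (i + 1) j rfl h0 (by omega),
            pyGetD_set_ne _ i.toNat "." j h0 (by omega),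
            pyGetD_set_ne t (i + 1).toNat _ j h0 (by omega)]
        · rw [if_neg hD]
    · rw [if_neg hc]

lemma slideB_pyGetD_lt' (n : Int) (t : List String) (i j : Int) (h0 : 0 ≤ j) (hj : j < i) :
    PySem.List.pyGetD (slideB n t i) j "" = PySem.List.pyGetD t j "" :=
  slideB_pyGetD_lt n _ t i j rfl h0 hj

-- the sequential slide absorbs one synchronized substep of A
lemma slideB_moveA (n : Int) (t : List String) (i : Int) :
    slideB n (moveA n t i).1 (moveA n t i).2 = slideB n t i := by
  unfold moveA
  by_cases hc : 1 ≤ i ∧ i < n - 2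
  · by_cases hO : PySem.List.pyGetD t (i + 1) "" = "O"
    · simp only [if_pos hc, if_pos hO]
      rw [slideB_id n _ (-1) (by omega), slideB_eq n t i, if_pos hc, if_pos hO]
    · by_cases hD : PySem.List.pyGetD t (i + 1) "" = "."
      · simp only [if_pos hc, if_neg hO, if_pos hD]
        rw [slideB_eq n t i, if_pos hc, if_neg hO, if_pos hD, hD]
      · simp only [if_pos hc, if_neg hO, if_neg hD]
  · simp only [if_neg hc]

-- the invariant carried through A's loop: lengths, bounds, the front cell holds a bead,
-- and the back bead is strictly behind a live front
def InvP (n : Int) (t : List String) (f b : Int) : Prop :=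
  (t.length : Int) = n ∧ -1 ≤ f ∧ f < n ∧ -1 ≤ b ∧ b < n ∧
  (0 ≤ f → PySem.List.pyGetD t f "" = "R" ∨ PySem.List.pyGetD t f "" = "B") ∧
  (0 ≤ b → b < f ∨ f = -1)

lemma front_inv (n : Int) (t : List String) (f b : Int) (h : InvP n t f b) :
    InvP n (moveA n t f).1 (moveA n t f).2 b := by
  obtain ⟨hl, hf1, hf2, hb1, hb2, hbead, hlt⟩ := h
  have hn0 : (0 : Int) ≤ n := hl ▸ Int.natCast_nonneg _
  unfold moveA
  by_cases hc : 1 ≤ f ∧ f < n - 2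
  · by_cases hO : PySem.List.pyGetD t (f + 1) "" = "O"
    · simp only [if_pos hc, if_pos hO]
      exact ⟨by simp [hl], by omega, by omega, hb1, hb2,
        fun h => absurd h (by omega), fun _ => Or.inr rfl⟩
    · by_cases hD : PySem.List.pyGetD t (f + 1) "" = "."
      · simp only [if_pos hc, if_neg hO, if_pos hD]
        refine ⟨by simp [hl], by omega, by omega, hb1, hb2, ?_, ?_⟩
        · intro _
          rw [pyGetD_set_ne _ f.toNat _ (f + 1) (by omega) (by omega),
            pyGetD_set_eq t (f + 1).toNat _ (f + 1) (by omega) (by omega) (by omega)]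
          exact hbead (by omega)
        · intro hb0
          rcases hlt hb0 with h' | h' <;> omega
      · simp only [if_pos hc, if_neg hO, if_neg hD]
        exact ⟨hl, hf1, hf2, hb1, hb2, hbead, hlt⟩
  · simp only [if_neg hc]
    exact ⟨hl, hf1, hf2, hb1, hb2, hbead, hlt⟩

-- the key exchange: one substep of the back bead, taken before the front finishes its
-- slide, can be postponed until after it
lemma back_main (n : Int) (t : List String) (f b : Int) (h : InvP n t f b) :
    InvP n (moveA n t b).1 f (moveA n t b).2 ∧
    slideB n (slideB n (moveA n t b).1 f) (moveA n t b).2 = slideB n (slideB n t f) b := by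
  obtain ⟨hl, hf1, hf2, hb1, hb2, hbead, hlt⟩ := h
  have hn0 : (0 : Int) ≤ n := hl ▸ Int.natCast_nonneg _
  unfold moveA
  by_cases hc : 1 ≤ b ∧ b < n - 2
  · have hbf : b < f ∨ f = -1 := hlt (by omega)
    by_cases hO : PySem.List.pyGetD t (b + 1) "" = "O"
    · have hne : 0 ≤ f → b + 1 < f := by
        intro hf0
        have : b + 1 ≠ f := by
          intro he
          rcases hbead hf0 with hx | hx <;> rw [← he, hO] at hx <;> simp at hx
        omega
      simp only [if_pos hc, if_pos hO]
      constructor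
      · refine ⟨by simp [hl], hf1, hf2, by omega, by omega, ?_, fun h' => absurd h' (by omega)⟩
        intro hf0
        rw [pyGetD_set_ne t b.toNat "." f hf0 (by omega)]
        exact hbead hf0
      · rw [slideB_id n _ (-1) (by omega)]
        by_cases hf0 : 0 ≤ f
        · have hbf' : b + 1 < f := hne hf0
          rw [slideB_set_lt' n t f b.toNat "." (by omega)]
          conv_rhs => rw [slideB_eq n (slideB n t f) b, if_pos hc,
            slideB_pyGetD_lt' n t f (b + 1) (by omega) (by omega), if_pos hO]
        · have hfm : f = -1 := by omega
          subst hfm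
          rw [slideB_id n _ (-1) (by omega), slideB_id n t (-1) (by omega),
            slideB_eq n t b, if_pos hc, if_pos hO]
    · by_cases hD : PySem.List.pyGetD t (b + 1) "" = "."
      · have hne : 0 ≤ f → b + 1 < f := by
          intro hf0
          have : b + 1 ≠ f := by
            intro he
            rcases hbead hf0 with hx | hx <;> rw [← he, hD] at hx <;> simp at hx
          omega
        simp only [if_pos hc, if_neg hO, if_pos hD]
        constructor
        · refine ⟨by simp [hl], hf1, hf2, by omega, by omega, ?_, ?_⟩
          · intro hf0
            rw [pyGetD_set_ne _ b.toNat _ f hf0 (by omega),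
              pyGetD_set_ne t (b + 1).toNat _ f hf0 (by omega)]
            exact hbead hf0
          · intro _
            rcases hbf with h' | h'
            · exact Or.inl (by have := hne (by omega); omega)
            · exact Or.inr h'
        · by_cases hf0 : 0 ≤ f
          · have hbf' : b + 1 < f := hne hf0
            rw [hD, slideB_set_lt' n _ f b.toNat "." (by omega),
              slideB_set_lt' n t f (b + 1).toNat _ (by omega)]
            conv_rhs => rw [slideB_eq n (slideB n t f) b, if_pos hc,
              slideB_pyGetD_lt' n t f (b + 1) (by omega) (by omega), if_neg hO, if_pos hD,
              slideB_pyGetD_lt' n t f b (by omega) (by omega)]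
          · have hfm : f = -1 := by omega
            subst hfm
            rw [slideB_id n _ (-1) (by omega), slideB_id n t (-1) (by omega),
              slideB_eq n t b, if_pos hc, if_neg hO, if_pos hD, hD]
      · simp only [if_pos hc, if_neg hO, if_neg hD]
        exact ⟨⟨hl, hf1, hf2, hb1, hb2, hbead, hlt⟩, by trivial⟩
  · simp only [if_neg hc]
    exact ⟨⟨hl, hf1, hf2, hb1, hb2, hbead, hlt⟩, by trivial⟩

-- one full iteration of A's loop preserves the invariant and the completed row
lemma step_all (n : Int) (t : List String) (f b : Int) (h : InvP n t f b) :
    InvP n (moveA n (moveA n t f).1 b).1 (moveA n t f).2 (moveA n (moveA n t f).1 b).2 ∧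
    slideB n (slideB n (moveA n (moveA n t f).1 b).1 (moveA n t f).2)
        (moveA n (moveA n t f).1 b).2
      = slideB n (slideB n t f) b := by
  obtain ⟨hI, hEq⟩ := back_main n (moveA n t f).1 (moveA n t f).2 b (front_inv n t f b h)
  exact ⟨hI, by rw [hEq, slideB_moveA]⟩

lemma loopA_succ (n : Int) (k : Nat) (t : List String) (f b : Int) :
    loopA n (k + 1) t f b
      = loopA n k (moveA n (moveA n t f).1 b).1 (moveA n t f).2 (moveA n (moveA n t f).1 b).2 := by
  simp [loopA]

lemma loop_main (n : Int) (k : Nat) :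
    ∀ (t : List String) (f b : Int), InvP n t f b →
      InvP n (loopA n k t f b).1 (loopA n k t f b).2.1 (loopA n k t f b).2.2 ∧
      slideB n (slideB n (loopA n k t f b).1 (loopA n k t f b).2.1) (loopA n k t f b).2.2
        = slideB n (slideB n t f) b := by
  induction k with
  | zero => intro t f b h; exact ⟨h, rfl⟩
  | succ k IH =>
    intro t f b h
    rw [loopA_succ]
    obtain ⟨hI, hEq⟩ := step_all n t f b h
    obtain ⟨hI', hEq'⟩ := IH _ _ _ hI
    exact ⟨hI', by rw [hEq', hEq]⟩

-- the front bead is finished: out of range, or the next cell is neither hole nor empty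
def stuckF (n : Int) (t : List String) (f : Int) : Prop :=
  ¬(1 ≤ f ∧ f < n - 2 ∧
    (PySem.List.pyGetD t (f + 1) "" = "O" ∨ PySem.List.pyGetD t (f + 1) "" = "."))

-- the back bead is permanently finished: out of range, or blocked by a cell that will
-- never change (not the front bead, or the front bead itself is finished)
def permB (n : Int) (t : List String) (f b : Int) : Prop :=
  ¬(1 ≤ b ∧ b < n - 2) ∨
  (PySem.List.pyGetD t (b + 1) "" ≠ "O" ∧ PySem.List.pyGetD t (b + 1) "" ≠ "." ∧
    (b + 1 ≠ f ∨ stuckF n t f))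

lemma stuck_slideB (n : Int) (t : List String) (i : Int) (h : stuckF n t i) :
    slideB n t i = t := by
  unfold stuckF at h
  rw [slideB_eq]
  split_ifs with h1 h2 h3 <;> tauto

lemma perm_slideB (n : Int) (t : List String) (f b : Int) (h : permB n t f b) :
    slideB n t b = t := by
  rw [slideB_eq]
  rcases h with h | ⟨h1, h2, _⟩
  · rw [if_neg h]
  · split_ifs with hc hO hD <;> tauto

lemma moveA_stuck (n : Int) (t : List String) (f : Int) (hs : stuckF n t f) :
    moveA n t f = (t, f) := by
  unfold stuckF at hs
  unfold moveA
  split_ifs with h1 h2 h3 <;> tauto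

lemma moveA_id_of (n : Int) (t : List String) (i : Int) (h : ¬(1 ≤ i ∧ i < n - 2)) :
    moveA n t i = (t, i) := by
  unfold moveA
  rw [if_neg h]

-- a finished front stays finished through the back bead's substep
lemma stuckF_after_back (n : Int) (t : List String) (f b : Int) (h : InvP n t f b)
    (hs : stuckF n t f) : stuckF n (moveA n t b).1 f := by
  obtain ⟨hl, hf1, hf2, hb1, hb2, hbead, hlt⟩ := h
  unfold moveA
  by_cases hc : 1 ≤ b ∧ b < n - 2
  · have hbf : b < f ∨ f = -1 := hlt (by omega)
    by_cases hO : PySem.List.pyGetD t (b + 1) "" = "O"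
    · simp only [if_pos hc, if_pos hO]
      unfold stuckF at hs ⊢
      rintro ⟨h1, h2, h3⟩
      exact hs ⟨h1, h2, by rwa [pyGetD_set_ne t b.toNat "." (f + 1) (by omega) (by omega)] at h3⟩
    · by_cases hD : PySem.List.pyGetD t (b + 1) "" = "."
      · simp only [if_pos hc, if_neg hO, if_pos hD]
        unfold stuckF at hs ⊢
        rintro ⟨h1, h2, h3⟩
        rw [pyGetD_set_ne _ b.toNat _ (f + 1) (by omega) (by omega),
          pyGetD_set_ne t (b + 1).toNat _ (f + 1) (by omega) (by omega)] at h3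
        exact hs ⟨h1, h2, h3⟩
      · simp only [if_pos hc, if_neg hO, if_neg hD]
        exact hs
  · simp only [if_neg hc]
    exact hs

-- a permanently finished back bead survives one full iteration of A's loop
lemma permB_after (n : Int) (t : List String) (f b : Int) (h : InvP n t f b)
    (hp : permB n t f b) :
    moveA n (moveA n t f).1 b = ((moveA n t f).1, b) ∧
    permB n (moveA n (moveA n t f).1 b).1 (moveA n t f).2 b := by
  obtain ⟨hl, hf1, hf2, hb1, hb2, hbead, hlt⟩ := h
  rcases hp with hp | ⟨h1, h2, h3⟩
  · rw [moveA_id_of n _ b hp]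
    exact ⟨rfl, Or.inl hp⟩
  · by_cases hcb : 1 ≤ b ∧ b < n - 2
    · have hbf : b < f ∨ f = -1 := hlt (by omega)
      rcases h3 with h3 | h3
      · -- blocked by a static cell: the front substep does not touch cell b+1
        have hcell : PySem.List.pyGetD (moveA n t f).1 (b + 1) "" = PySem.List.pyGetD t (b + 1) "" := by
          unfold moveA
          split_ifs with hcf hOf hDf
          · exact pyGetD_set_ne t f.toNat "." (b + 1) (by omega) (by omega)
          · rw [pyGetD_set_ne _ f.toNat _ (b + 1) (by omega) (by omega),
              pyGetD_set_ne t (f + 1).toNat _ (b + 1) (by omega) (by omega)]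
          · rfl
          · rfl
        have hf2' : (moveA n t f).2 = f ∨ (moveA n t f).2 = f + 1 ∨ (moveA n t f).2 = -1 := by
          unfold moveA
          split_ifs <;> simp
        set t1 := (moveA n t f).1 with ht1
        have hid : moveA n t1 b = (t1, b) := by
          unfold moveA
          rw [if_pos hcb, hcell, if_neg h1, if_neg h2]
        refine ⟨hid, ?_⟩
        rw [hid]
        refine Or.inr ⟨by rw [hcell]; exact h1, by rw [hcell]; exact h2, Or.inl ?_⟩
        rcases hf2' with h' | h' | h' <;> rw [h'] <;> omega
      · -- blocked behind a finished front: everything is frozen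
        have hmf : moveA n t f = (t, f) := moveA_stuck n t f h3
        rw [hmf]
        have hid : moveA n t b = (t, b) := by
          unfold moveA
          rw [if_pos hcb, if_neg h1, if_neg h2]
        rw [hid]
        exact ⟨rfl, Or.inr ⟨h1, h2, Or.inr h3⟩⟩
    · have hid : moveA n (moveA n t f).1 b = ((moveA n t f).1, b) := moveA_id_of n _ b hcb
      exact ⟨hid, by rw [hid]; exact Or.inl hcb⟩

-- a front bead that is not finished advances or drops into a hole
lemma front_moves (n : Int) (t : List String) (f : Int) (hns : ¬stuckF n t f) :
    (moveA n t f).2 = -1 ∨ (moveA n t f).2 = f + 1 := by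
  unfold stuckF at hns
  push Not at hns
  unfold moveA
  split_ifs with h1 h2 h3 <;> simp <;> tauto

-- a back bead that is not permanently finished advances or drops in one full iteration
lemma back_moves (n : Int) (t : List String) (f b : Int) (h : InvP n t f b)
    (hnp : ¬permB n t f b) :
    (moveA n (moveA n t f).1 b).2 = -1 ∨ (moveA n (moveA n t f).1 b).2 = b + 1 := by
  obtain ⟨hl, hf1, hf2, hb1, hb2, hbead, hlt⟩ := h
  unfold permB at hnp
  push Not at hnp
  obtain ⟨hcb, hrest⟩ := hnp
  have hbf : b < f ∨ f = -1 := hlt (by omega)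
  by_cases hOD : PySem.List.pyGetD t (b + 1) "" = "O" ∨ PySem.List.pyGetD t (b + 1) "" = "."
  · -- the blocking cell is a hole or empty already; the front substep does not touch it
    have hnb : 0 ≤ f → b + 1 ≠ f := by
      intro hf0 he
      rcases hbead hf0 with hx | hx <;> rcases hOD with hy | hy <;>
        rw [← he, hy] at hx <;> simp at hx
    have hcell : PySem.List.pyGetD (moveA n t f).1 (b + 1) "" = PySem.List.pyGetD t (b + 1) "" := by
      unfold moveA
      split_ifs with hcf hOf hDf
      · exact pyGetD_set_ne t f.toNat "." (b + 1) (by omega) (by have := hnb (by omega); omega)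
      · have hne := hnb (by omega)
        rw [pyGetD_set_ne _ f.toNat _ (b + 1) (by omega) (by omega),
          pyGetD_set_ne t (f + 1).toNat _ (b + 1) (by omega) (by omega)]
      · rfl
      · rfl
    set t1 := (moveA n t f).1 with ht1
    unfold moveA
    rw [if_pos hcb, hcell]
    rcases hOD with hy | hy
    · rw [if_pos hy]; exact Or.inl rfl
    · by_cases hOy : PySem.List.pyGetD t (b + 1) "" = "O"
      · rw [if_pos hOy]; exact Or.inl rfl
      · rw [if_neg hOy, if_pos hy]; exact Or.inr rfl
  · -- blocked by the front bead, which itself moves away this iteration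
    push Not at hOD
    obtain ⟨hbfe, hnst⟩ := hrest hOD.1 hOD.2
    unfold stuckF at hnst
    push Not at hnst
    obtain ⟨hcf, hfr, hmov⟩ := hnst
    have hfb1 : f = b + 1 := hbfe.symm
    have hlen : f.toNat < t.length := by omega
    have hcell : PySem.List.pyGetD (moveA n t f).1 (b + 1) "" = "." := by
      unfold moveA
      rw [if_pos ⟨hcf, hfr⟩]
      rcases hmov with hy | hy
      · rw [if_pos hy]
        exact pyGetD_set_eq t f.toNat "." (b + 1) (by omega) (by omega) hlen
      · rw [if_neg (by rw [hy]; simp), if_pos hy]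
        rw [pyGetD_set_eq _ f.toNat _ (b + 1) (by omega) (by omega) (by simpa using hlen), hy]
    set t1 := (moveA n t f).1 with ht1
    unfold moveA
    rw [if_pos hcb, hcell, if_neg (by simp), if_pos rfl]
    exact Or.inr rfl

-- finished-ness of the front persists through the whole loop
lemma loop_stuck (n : Int) (k : Nat) :
    ∀ (t : List String) (f b : Int), InvP n t f b → stuckF n t f →
      stuckF n (loopA n k t f b).1 (loopA n k t f b).2.1 := by
  induction k with
  | zero => intro t f b _ hs; exact hs
  | succ k IH =>
    intro t f b h hs
    rw [loopA_succ]
    have hmf : moveA n t f = (t, f) := moveA_stuck n t f hs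
    rw [hmf]
    have hI := (step_all n t f b h).1
    rw [hmf] at hI
    exact IH _ _ _ hI (stuckF_after_back n t f b h hs)

-- after k iterations the front is finished, gone, or has advanced k cells
lemma loop_front (n : Int) (k : Nat) :
    ∀ (t : List String) (f b : Int), InvP n t f b →
      stuckF n (loopA n k t f b).1 (loopA n k t f b).2.1 ∨
      (loopA n k t f b).2.1 = -1 ∨
      ((loopA n k t f b).2.1 ≥ f + k ∧ 1 ≤ f) := by
  induction k with
  | zero =>
    intro t f b h
    simp only [loopA]
    by_cases hf : 1 ≤ f
    · exact Or.inr (Or.inr ⟨by omega, hf⟩)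
    · by_cases hfm : f = -1
      · exact Or.inr (Or.inl hfm)
      · exact Or.inl (by unfold stuckF; omega)
  | succ k IH =>
    intro t f b h
    rw [loopA_succ]
    have hI := (step_all n t f b h).1
    by_cases hs : stuckF n t f
    · have hmf : moveA n t f = (t, f) := moveA_stuck n t f hs
      rw [hmf] at hI ⊢
      exact Or.inl (loop_stuck n k _ _ _ hI (stuckF_after_back n t f b h hs))
    · have hf1 : 1 ≤ f := by
        by_contra hf1
        exact hs (by unfold stuckF; omega)
      rcases front_moves n t f hs with hv | hv <;> rw [hv] at hI ⊢
      · rcases IH _ _ _ hI with h' | h' | h'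
        · exact Or.inl h'
        · exact Or.inr (Or.inl h')
        · omega
      · rcases IH _ _ _ hI with h' | h' | h'
        · exact Or.inl h'
        · exact Or.inr (Or.inl h')
        · exact Or.inr (Or.inr ⟨by omega, hf1⟩)

-- permanent finished-ness of the back persists through the whole loop
lemma loop_perm (n : Int) (k : Nat) :
    ∀ (t : List String) (f b : Int), InvP n t f b → permB n t f b →
      permB n (loopA n k t f b).1 (loopA n k t f b).2.1 (loopA n k t f b).2.2 := by
  induction k with
  | zero => intro t f b _ hp; exact hp
  | succ k IH =>
    intro t f b h hp
    rw [loopA_succ]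
    obtain ⟨hid, hp'⟩ := permB_after n t f b h hp
    have hI := (step_all n t f b h).1
    rw [hid] at hI hp' ⊢
    dsimp only at hI hp' ⊢
    exact IH _ _ _ hI hp'

-- after k iterations the back is permanently finished, gone, or has advanced k cells
lemma loop_back (n : Int) (k : Nat) :
    ∀ (t : List String) (f b : Int), InvP n t f b →
      permB n (loopA n k t f b).1 (loopA n k t f b).2.1 (loopA n k t f b).2.2 ∨
      (loopA n k t f b).2.2 = -1 ∨
      ((loopA n k t f b).2.2 ≥ b + k ∧ 1 ≤ b) := by
  induction k with
  | zero =>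
    intro t f b h
    simp only [loopA]
    by_cases hb : 1 ≤ b
    · exact Or.inr (Or.inr ⟨by omega, hb⟩)
    · by_cases hbm : b = -1
      · exact Or.inr (Or.inl hbm)
      · exact Or.inl (Or.inl (by omega))
  | succ k IH =>
    intro t f b h
    rw [loopA_succ]
    have hI := (step_all n t f b h).1
    by_cases hp : permB n t f b
    · obtain ⟨hid, hp'⟩ := permB_after n t f b h hp
      rw [hid] at hI hp' ⊢
      dsimp only at hI hp' ⊢
      exact Or.inl (loop_perm n k _ _ _ hI hp')
    · have hb1 : 1 ≤ b := by
        by_contra hb1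
        exact hp (Or.inl (by omega))
      rcases back_moves n t f b h hp with hv | hv <;> rw [hv] at hI ⊢
      · rcases IH _ _ _ hI with h' | h' | h'
        · exact Or.inl h'
        · exact Or.inr (Or.inl h')
        · omega
      · rcases IH _ _ _ hI with h' | h' | h'
        · exact Or.inl h'
        · exact Or.inr (Or.inl h')
        · exact Or.inr (Or.inr ⟨by omega, hb1⟩)

-- after len-3 iterations A's row is already the fully slid row
lemma final_eq (row : List String) (f b : Int)
    (hInv : InvP (row.length : Int) row f b) :
    (loopA (row.length : Int) (row.length - 3) row f b).1
      = slideB (row.length : Int) (slideB (row.length : Int) row f) b := by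
  obtain ⟨hI, hEq⟩ := loop_main (row.length : Int) (row.length - 3) row f b hInv
  obtain ⟨hl, hf1, hf2, hb1, hb2, _, _⟩ := hI
  have hf := loop_front (row.length : Int) (row.length - 3) row f b hInv
  have hb := loop_back (row.length : Int) (row.length - 3) row f b hInv
  have h1 : slideB (row.length : Int) (loopA (row.length : Int) (row.length - 3) row f b).1
      (loopA (row.length : Int) (row.length - 3) row f b).2.1
      = (loopA (row.length : Int) (row.length - 3) row f b).1 := by
    rcases hf with h' | h' | ⟨hge, hf1'⟩
    · exact stuck_slideB _ _ _ h'
    · exact slideB_id _ _ _ (by omega)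
    · exact slideB_id _ _ _ (by omega)
  have h2 : slideB (row.length : Int) (loopA (row.length : Int) (row.length - 3) row f b).1
      (loopA (row.length : Int) (row.length - 3) row f b).2.2
      = (loopA (row.length : Int) (row.length - 3) row f b).1 := by
    rcases hb with h' | h' | ⟨hge, hb1'⟩
    · exact perm_slideB _ _ _ _ h'
    · exact slideB_id _ _ _ (by omega)
    · exact slideB_id _ _ _ (by omega)
  rw [h1, h2] at hEq
  exact hEq

-- the initial indices satisfy the invariant
lemma init_inv (row : List String) (red blue : Int)
    (hr : red = -1 ∨ (0 ≤ red ∧ red < (row.length : Int) ∧ PySem.List.pyGetD row red "" = "R"))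
    (hb : blue = -1 ∨ (0 ≤ blue ∧ blue < (row.length : Int) ∧ PySem.List.pyGetD row blue "" = "B")) :
    InvP (row.length : Int) row (if red < blue then blue else red)
      (if red < blue then red else blue) := by
  have hrb : 0 ≤ red → 0 ≤ blue → red ≠ blue := by
    rintro h1 h2 rfl
    rcases hr with h' | ⟨_, _, h'⟩
    · omega
    · rcases hb with h'' | ⟨_, _, h''⟩
      · omega
      · rw [h'] at h''; simp at h''
  by_cases hlt : red < blue
  · rw [if_pos hlt, if_pos hlt]
    rcases hb with h' | ⟨h1, h2, h3⟩
    · rcases hr with h'' | ⟨g1, g2, g3⟩ <;> omega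
    · refine ⟨rfl, by omega, h2, ?_, by omega, fun _ => Or.inr h3, fun h'' => Or.inl (by omega)⟩
      rcases hr with h'' | ⟨g1, g2, g3⟩ <;> omega
  · rw [if_neg hlt, if_neg hlt]
    rcases hr with h' | ⟨h1, h2, h3⟩
    · rcases hb with h'' | ⟨g1, g2, g3⟩
      · refine ⟨rfl, by omega, by omega, by omega, by omega, fun hx => absurd hx (by omega),
          fun hx => absurd hx (by omega)⟩
      · omega
    · refine ⟨rfl, by omega, h2, ?_, ?_, fun _ => Or.inl h3, ?_⟩
      · rcases hb with h'' | ⟨g1, g2, g3⟩ <;> omega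
      · rcases hb with h'' | ⟨g1, g2, g3⟩ <;> omega
      · intro hx
        rcases hb with h'' | ⟨g1, g2, g3⟩
        · omega
        · exact Or.inl (by have := hrb (by omega) (by omega); omega)

-- reading a bead's cell from a successful index? call
lemma index_cell (row : List String) (v : String) (k : Nat)
    (h : PySem.List.index? row v = some k) :
    (k : Int) < (row.length : Int) ∧ PySem.List.pyGetD row (k : Int) "" = v := by
  obtain ⟨hk, hval, _⟩ := PySem.List.getElem_of_index?_eq_some h
  constructor
  · omega
  · rw [PySem.List.pyGetD_of_nonneg _ _ (by omega)]
    simp only [Int.toNat_natCast]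
    rw [List.getD_eq_getElem?_getD, List.getElem?_eq_getElem hk, hval]
    rfl

-- ===== VERDICT (by name: the statement is the Claim_ definition above) =====
theorem tilt_row_right_spec : Claim_equal_tilt_row_right := by
  unfold Claim_equal_tilt_row_right Spec_tilt_row_right
  intro row _
  unfold tilt_row_right tilt_row_right_alt
  simp only []
  set red : Int := match PySem.List.index? row "R" with | some k => (k : Int) | none => -1 with hred
  set blue : Int := match PySem.List.index? row "B" with | some k => (k : Int) | none => -1 with hblue
  have hr : red = -1 ∨ (0 ≤ red ∧ red < (row.length : Int) ∧ PySem.List.pyGetD row red "" = "R") := by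
    rw [hred]
    cases hR : PySem.List.index? row "R" with
    | none => exact Or.inl rfl
    | some k =>
      obtain ⟨h1, h2⟩ := index_cell row "R" k hR
      exact Or.inr ⟨Int.natCast_nonneg k, h1, h2⟩
  have hb : blue = -1 ∨ (0 ≤ blue ∧ blue < (row.length : Int) ∧ PySem.List.pyGetD row blue "" = "B") := by
    rw [hblue]
    cases hB : PySem.List.index? row "B" with
    | none => exact Or.inl rfl
    | some k =>
      obtain ⟨h1, h2⟩ := index_cell row "B" k hB
      exact Or.inr ⟨Int.natCast_nonneg k, h1, h2⟩
  have hInv := init_inv row red blue hr hb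
  by_cases hlt : red < blue
  · simp only [if_pos hlt] at hInv ⊢
    exact final_eq row blue red hInv
  · simp only [if_neg hlt] at hInv ⊢
    exact final_eq row red blue hInv
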